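-- pv_equiv track=rewrite | github.com/Tsunaou/3TS | src/dbtest/py-runner/3ts_checker.py | get_finish_time
-- ===== SOURCE A (Python) =====
-- def get_finish_time(query: str):
--     pos = query.find("finishedat:")
--     pos += len("finishedat:")
--     data_value = ""
--     tmp, tmp1 = "", ""
--     for i in range(pos, len(query)):
--         if query[i].isdigit():
--             tmp += query[i]
--         else:
--             for j in range(3 - len(tmp)):
--                 tmp1 += "0"
--             tmp = tmp1 + tmp
--             data_value += tmp
--             tmp, tmp1 = "", ""
--     data_value = int(data_value)
--     return data_value
-- ===== SOURCE B (Python) =====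
-- import re
--
-- def get_finish_time(query: str):
--     pos = query.find("finishedat:") + len("finishedat:")
--     runs = re.split(r'\D', query[pos:])
--     return int(''.join(run.zfill(3) for run in runs[:-1]))
-- ===== Notes on version B (the rewrite author's own statement) =====
-- stated objective: idiomatic
-- what changed: Replaces the character-index loop with its manual digit-run accumulator and inner zero-padding loop by slicing off the prefix, regex-splitting the suffix on non-digits, zero-padding each run with zfill(3) and joining.
import Mathlib
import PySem

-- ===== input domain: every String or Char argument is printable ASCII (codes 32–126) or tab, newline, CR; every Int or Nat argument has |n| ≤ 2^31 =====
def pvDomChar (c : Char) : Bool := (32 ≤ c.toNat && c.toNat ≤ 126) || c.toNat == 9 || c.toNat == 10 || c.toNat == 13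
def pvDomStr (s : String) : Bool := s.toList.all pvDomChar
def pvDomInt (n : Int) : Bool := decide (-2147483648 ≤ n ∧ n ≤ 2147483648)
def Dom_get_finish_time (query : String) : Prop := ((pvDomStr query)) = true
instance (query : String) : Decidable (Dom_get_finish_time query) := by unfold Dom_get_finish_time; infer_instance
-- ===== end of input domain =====

-- B re-implements the parse idiomatically: slice off the prefix, regex-split the suffix into
-- digit runs, zero-pad each with zfill(3) and join — same return value; objective: idiomatic/simpler.

-- ===== PORT A =====
-- literal transliteration of A: find, then an index loop accumulating digit runs,
-- an inner zero-padding loop on each flush; int('') (raised in Python) is excluded by Pre_.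
def get_finish_time (query : String) : Int :=
  let pos : Int := PySem.Str.find query "finishedat:" + 11
  let cs := query.toList
  let st :=
    (PySem.List.pyRange pos (cs.length : Int) 1).foldl
      (fun (st : List Char × List Char) i =>
        let c := PySem.List.pyGetD cs i ' '   -- index always in range here (pos ≥ 10)
        if PySem.Chars.isdigit c then (st.1, st.2 ++ [c])
        else
          let tmp1 :=
            (PySem.List.pyRange 0 (3 - (st.2.length : Int)) 1).foldl
              (fun (acc : List Char) _ => acc ++ ['0']) []
          (st.1 ++ (tmp1 ++ st.2), []))
      ([], [])
  (PySem.Int.ofChars? st.1).getD 0   -- int(data_value); none (ValueError) excluded by Pre_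

-- ===== PORT B =====
-- re.split(r'\D', s): split at every non-digit character (hand-ported, exact:
-- each non-digit is a one-char separator, empty fields survive).
def pvSplitND : List Char -> List (List Char)
  | [] => [[]]
  | c :: r =>
    if PySem.Chars.isdigit c then
      match pvSplitND r with
      | g :: gs => (c :: g) :: gs
      | [] => [[c]]
    else [] :: pvSplitND r

def get_finish_time_alt (query : String) : Int :=
  let pos : Int := PySem.Str.find query "finishedat:" + 11
  let runs := pvSplitND (PySem.List.slice query.toList (some pos) none)
  let digits := ((PySem.List.slice runs none (some (-1))).map
      (fun g => PySem.Chars.zfill g 3)).flatten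
  (PySem.Int.ofChars? digits).getD 0

-- ===== PRECONDITION & SPEC =====
-- Pre_ excludes exactly the inputs where the Python A raises ValueError (int('')):
-- the part of the query after "finishedat:" (after position 10 if the tag is absent)
-- contains no non-digit character, so no digit run is ever flushed.
def Pre_get_finish_time (query : String) : Prop :=
  ((query.toList.drop (PySem.Str.find query "finishedat:" + 11).toNat).any
    (fun c => !PySem.Chars.isdigit c)) = true
instance (query : String) : Decidable (Pre_get_finish_time query) := by
  unfold Pre_get_finish_time; infer_instance
def pvWitness_get_finish_time : String := "finishedat:12 345 "
def Spec_get_finish_time (query : String) (out : Int) : Prop := out = get_finish_time_alt query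
instance (query : String) (out : Int) : Decidable (Spec_get_finish_time query out) := by
  unfold Spec_get_finish_time; infer_instance

-- ===== CLAIM (what is proved, stated in full; the proofs are below) =====
def Claim_equal_get_finish_time : Prop := ∀ (query : String), Dom_get_finish_time query → Pre_get_finish_time query → Spec_get_finish_time query (get_finish_time query)

-- ===== LEMMAS AND PROOFS =====

-- A's inner padding loop is a replicate
theorem pv_padloop (n : Int) :
    (PySem.List.pyRange 0 n 1).foldl (fun (acc : List Char) _ => acc ++ ['0']) []
      = List.replicate n.toNat '0' := by
  have gen : ∀ (l : List Int) (init : List Char),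
      l.foldl (fun (acc : List Char) _ => acc ++ ['0']) init
        = init ++ List.replicate l.length '0' := by
    intro l
    induction l with
    | nil => simp
    | cons x r ih =>
      intro init
      simp [List.foldl, ih, List.replicate_succ]
  rw [gen]
  simp [PySem.List.length_pyRange_one]

-- zfill on a digit run is plain left zero-padding
theorem pv_zfill_digits (g : List Char) (h : ∀ c ∈ g, PySem.Chars.isdigit c = true) :
    PySem.Chars.zfill g 3 = List.replicate (3 - g.length) '0' ++ g := by
  unfold PySem.Chars.zfill
  split_ifs with h3
  · have : 3 - g.length = 0 := by omega
    simp [this]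
  · match g with
    | [] => simp
    | c :: rest =>
      have hc := h c (by simp)
      have : ¬ (c = '+' ∨ c = '-') := by
        rintro (rfl | rfl) <;> simp [PySem.Chars.isdigit] at hc
      simp only [if_neg this]
      have h4 : (3 : Int).toNat = 3 := rfl
      rw [h4]

theorem pvSplitND_ne_nil (cs : List Char) : pvSplitND cs ≠ [] := by
  induction cs with
  | nil => simp [pvSplitND]
  | cons c r ih =>
    simp only [pvSplitND]
    split_ifs
    · match hr : pvSplitND r with
      | [] => simp
      | g :: gs => simp
    · simp

theorem pvSplitND_digits (cs : List Char) :
    ∀ g ∈ pvSplitND cs, ∀ c ∈ g, PySem.Chars.isdigit c = true := by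
  induction cs with
  | nil => intro g hg c hc; simp [pvSplitND] at hg; subst hg; simp at hc
  | cons x r ih =>
    intro g hg c hc
    simp only [pvSplitND] at hg
    by_cases hd : PySem.Chars.isdigit x = true
    · rw [if_pos hd] at hg
      match hr : pvSplitND r with
      | [] => exact absurd hr (pvSplitND_ne_nil r)
      | g0 :: gs =>
        rw [hr] at hg
        simp at hg
        rcases hg with rfl | hg
        · rcases List.mem_cons.mp hc with rfl | hc2
          · exact hd
          · exact ih g0 (by rw [hr]; simp) c hc2
        · exact ih g (by rw [hr]; simp [hg]) c hc
    · rw [if_neg hd] at hg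
      rcases List.mem_cons.mp hg with rfl | hg2
      · simp at hc
      · exact ih g hg2 c hc

-- the padded flush string (shared shape of both sides)
def pvPad (g : List Char) : List Char := List.replicate (3 - g.length) '0' ++ g

-- prepend pending digits tmp onto the first run of the split
def pvPre (tmp : List Char) (cs : List Char) : List (List Char) :=
  match pvSplitND cs with
  | g :: gs => (tmp ++ g) :: gs
  | [] => [tmp]

-- loop invariant: A's fold emits exactly the padded, last-run-dropped split
theorem pv_loop (cs : List Char) : ∀ (data tmp : List Char),
    (cs.foldl
      (fun (st : List Char × List Char) c =>
        if PySem.Chars.isdigit c then (st.1, st.2 ++ [c])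
        else (st.1 ++ (List.replicate ((3 - (st.2.length : Int)).toNat) '0' ++ st.2), []))
      (data, tmp)).1
    = data ++ ((pvPre tmp cs).dropLast.map pvPad).flatten := by
  induction cs with
  | nil =>
    intro data tmp
    simp [pvPre, pvSplitND]
  | cons c r ih =>
    intro data tmp
    by_cases hd : PySem.Chars.isdigit c = true
    · rw [List.foldl_cons]
      simp only [hd, if_pos]
      rw [ih data (tmp ++ [c])]
      congr 2
      unfold pvPre
      simp only [pvSplitND, hd, if_pos]
      match hr : pvSplitND r with
      | [] => exact absurd hr (pvSplitND_ne_nil r)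
      | g :: gs => simp
    · rw [List.foldl_cons]
      rw [if_neg hd]
      rw [ih (data ++ (List.replicate ((3 - (tmp.length : Int)).toNat) '0' ++ tmp)) []]
      have hpre : pvPre tmp (c :: r) = tmp :: pvSplitND r := by
        unfold pvPre
        simp only [pvSplitND]
        rw [if_neg hd]
        match hr : pvSplitND r with
        | [] => exact absurd hr (pvSplitND_ne_nil r)
        | g :: gs => simp
      have hpre0 : pvPre [] r = pvSplitND r := by
        unfold pvPre
        match hr : pvSplitND r with
        | [] => exact absurd hr (pvSplitND_ne_nil r)
        | g :: gs => simp
      rw [hpre, hpre0]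
      rw [List.dropLast_cons_of_ne_nil (pvSplitND_ne_nil r)]
      simp only [List.map_cons, List.flatten_cons, List.append_assoc]
      have hn : (3 - (tmp.length : Int)).toNat = 3 - tmp.length := by omega
      rw [hn]
      simp [pvPad]

theorem get_finish_time_eq (query : String) :
    get_finish_time query = get_finish_time_alt query := by
  unfold get_finish_time get_finish_time_alt
  have hpos : (0 : Int) ≤ PySem.Str.find query "finishedat:" + 11 := by
    have h := PySem.Chars.neg_one_le_find query.toList "finishedat:".toList
    simp only [PySem.Str.find_eq]
    omega
  simp only []
  rw [PySem.List.foldl_pyRange_pyGetD' query.toList ' '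
        (fun (st : List Char × List Char) c =>
          if PySem.Chars.isdigit c then (st.1, st.2 ++ [c])
          else
            (st.1 ++ (((PySem.List.pyRange 0 (3 - (st.2.length : Int)) 1).foldl
                (fun (acc : List Char) _ => acc ++ ['0']) []) ++ st.2), []))
        ([], []) hpos]
  simp only [pv_padloop]
  rw [pv_loop]
  rw [PySem.List.slice_from _ hpos, PySem.List.slice_to_neg_one]
  have hpre0 : pvPre [] (query.toList.drop (PySem.Str.find query "finishedat:" + 11).toNat)
      = pvSplitND (query.toList.drop (PySem.Str.find query "finishedat:" + 11).toNat) := by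
    unfold pvPre
    match hr : pvSplitND (query.toList.drop (PySem.Str.find query "finishedat:" + 11).toNat) with
    | [] => exact absurd hr (pvSplitND_ne_nil _)
    | g :: gs => simp
  rw [hpre0]
  have hmap : ∀ (rs : List (List Char)),
      (∀ g ∈ rs, ∀ c ∈ g, PySem.Chars.isdigit c = true) →
      rs.dropLast.map (fun g => PySem.Chars.zfill g 3) = rs.dropLast.map pvPad := by
    intro rs hrs
    apply List.map_congr_left
    intro g hg
    have := pv_zfill_digits g (hrs g (List.dropLast_subset rs hg))
    rw [this]; rfl
  rw [hmap _ (pvSplitND_digits _)]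
  simp

-- ===== VERDICT (by name: the statement is the Claim_ definition above) =====
theorem get_finish_time_spec : Claim_equal_get_finish_time := by
  intro q _ _
  unfold Spec_get_finish_time
  exact get_finish_time_eq q
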